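-- pv_equiv track=rewrite | github.com/pypi-data/pypi-mirror-205 | packages/zys0428/zys0428-0.0.1-py3-none-any.whl/zys/24.py | get_all_operation_combine
-- ===== SOURCE A (Python) =====
-- from itertools import product, permutations
--
-- def get_all_operation_combine(cards):
--     c1, c2, c3, c4 = cards
--     operators = ['+', '-', '*', '/']
--
--     expressions = []
--
--     for p in product(operators, repeat=len(cards) - 1):  # 运算符是注入在数字之间，所以用数字的长度  -1
--         op1, op2, op3 = p  # 循环运算符 (3)
--
--         expressions.append('{} {} {} {} {} {} {}'.format(c1, op1, c2, op2, c3, op3, c4))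
--
--     return expressions  # 得出不同的数字和运算符组合的列表
-- ===== SOURCE B (Python) =====
-- def get_all_operation_combine(cards):
--     c1, c2, c3, c4 = cards
--     operators = ['+', '-', '*', '/']
--     exprs = ['{}'.format(c1)]
--     for card in (c2, c3, c4):
--         exprs = [e + ' ' + op + ' ' + '{}'.format(card) for e in exprs for op in operators]
--     return exprs
-- ===== Notes on version B (the rewrite author's own statement) =====
-- stated objective: alternative
-- what changed: B grows a running list of partial expression strings, extending it card by card with each operator, instead of enumerating all 3-operator tuples with itertools.product and formatting each once.
import Mathlib
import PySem

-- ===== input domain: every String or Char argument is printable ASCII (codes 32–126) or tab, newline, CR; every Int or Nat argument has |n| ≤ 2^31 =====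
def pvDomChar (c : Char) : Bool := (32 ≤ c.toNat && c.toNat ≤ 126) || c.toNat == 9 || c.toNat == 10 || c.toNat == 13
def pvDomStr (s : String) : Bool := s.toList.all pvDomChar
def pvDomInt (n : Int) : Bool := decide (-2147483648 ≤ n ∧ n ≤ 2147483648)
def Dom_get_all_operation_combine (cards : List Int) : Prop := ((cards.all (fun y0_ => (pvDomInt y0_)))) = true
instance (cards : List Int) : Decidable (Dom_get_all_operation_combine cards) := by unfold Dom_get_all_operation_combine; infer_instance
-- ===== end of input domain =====

-- B grows a running list of partial expressions extended card by card, instead of enumerating operator triples with product; same strings, same order.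


-- ===== PORT A =====
-- Port of A: nested iteration over operator triples (itertools.product order), one
-- format per triple. Raises ValueError unless len(cards) == 4 (excluded by Pre_).
def get_all_operation_combine (cards : List Int) : List String :=
  match cards with
  | [c1, c2, c3, c4] =>
    let operators : List String := ["+", "-", "*", "/"]
    operators.flatMap (fun op1 =>
      operators.flatMap (fun op2 =>
        operators.map (fun op3 =>
          PySem.Int.toStr c1 ++ " " ++ op1 ++ " " ++ PySem.Int.toStr c2 ++ " " ++ op2 ++
            " " ++ PySem.Int.toStr c3 ++ " " ++ op3 ++ " " ++ PySem.Int.toStr c4)))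
  | _ => []

-- ===== PORT B =====
-- Port of B: unpack card by card (ValueError cases fall to []), then maintain a
-- running list of partial expressions, extended card by card over (c2, c3, c4).
def get_all_operation_combine_alt (cards : List Int) : List String :=
  match cards with
  | [] => []
  | c1 :: t1 =>
    match t1 with
    | [] => []
    | c2 :: t2 =>
      match t2 with
      | [] => []
      | c3 :: t3 =>
        match t3 with
        | [] => []
        | c4 :: t4 =>
          match t4 with
          | _ :: _ => []
          | [] =>
            let operators : List String := ["+", "-", "*", "/"]
            [c2, c3, c4].foldl
              (fun exprs card =>
                exprs.flatMap (fun e =>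
                  operators.map (fun op => e ++ " " ++ op ++ " " ++ PySem.Int.toStr card)))
              [PySem.Int.toStr c1]

-- ===== PRECONDITION & SPEC =====
-- Pre_ excludes lists whose length is not 4, on which Python A raises ValueError at the unpack.
def Pre_get_all_operation_combine (cards : List Int) : Prop := cards.length = 4
instance (cards : List Int) : Decidable (Pre_get_all_operation_combine cards) := by unfold Pre_get_all_operation_combine; infer_instance
def pvWitness_get_all_operation_combine : List Int := [1, 2, 3, 4]
def Spec_get_all_operation_combine (cards : List Int) (out : List String) : Prop := out = get_all_operation_combine_alt cards
instance (cards : List Int) (out : List String) : Decidable (Spec_get_all_operation_combine cards out) := by unfold Spec_get_all_operation_combine; infer_instance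

-- ===== CLAIM (what is proved, stated in full; the proofs are below) =====
def Claim_equal_get_all_operation_combine : Prop := ∀ (cards : List Int), Dom_get_all_operation_combine cards → Pre_get_all_operation_combine cards → Spec_get_all_operation_combine cards (get_all_operation_combine cards)

-- ===== LEMMAS AND PROOFS =====

-- ===== VERDICT (by name: the statement is the Claim_ definition above) =====
theorem get_all_operation_combine_spec : Claim_equal_get_all_operation_combine := by
  intro cards _ hpre
  match cards with
  | [c1, c2, c3, c4] =>
    show _ = _
    simp [get_all_operation_combine, get_all_operation_combine_alt, List.foldl,
      List.flatMap, List.map]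
  | [] | [_] | [_, _] | [_, _, _] => simp [Pre_get_all_operation_combine] at hpre
  | _ :: _ :: _ :: _ :: _ :: _ => simp [Pre_get_all_operation_combine] at hpre
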